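-- pv_equiv track=rewrite | github.com/yongshanding/FastSC | fastsc/coloring/util.py | relabel_coloring
-- ===== SOURCE A (Python) =====
-- def relabel_coloring(int_coloring):
--     num_int = len(set(int_coloring.values()))
--     arr = [] # [(color, popularity) for each color]
--     for i in range(num_int):
--         num = len([k for k,v in int_coloring.items() if v == i])
--         arr.append((i,num))
--     arr.sort(key=lambda x:x[1]) # sort arr by popularity
--     new_coloring = {}
--     for i in range(num_int):
--         old_color = arr[num_int-i-1][0] # the new color is i
--         # collect the list of nodes with color = old_color
--         temp = [k for k,v in int_coloring.items() if v == old_color]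
--         # color them with the new color
--         for k in temp:
--             new_coloring[k] = i
--     return new_coloring
-- ===== SOURCE B (Python) =====
-- def relabel_coloring(int_coloring):
--     # One pass: count each color's popularity and group nodes by color.
--     cnt = {}
--     groups = {}
--     for k, v in int_coloring.items():
--         cnt[v] = cnt.get(v, 0) + 1
--         groups.setdefault(v, []).append(k)
--     d = len(cnt)
--     # Colors in descending order, stably sorted by descending popularity
--     # (ties therefore stay in descending-color order, as in the original).
--     order = sorted(range(d - 1, -1, -1), key=lambda c: -cnt.get(c, 0))
--     new_coloring = {}
--     for i, c in enumerate(order):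
--         for k in groups.get(c, []):
--             new_coloring[k] = i
--     return new_coloring
-- ===== Notes on version B (the rewrite author's own statement) =====
-- stated objective: alternative
-- what changed: Replaces the per-color scans of the whole dict (one counting scan per color and one collecting scan per new color) by a single pass that counts popularities and groups nodes by color at once, then one stable sort of the color indices in descending order by descending popularity and a single assignment pass.
import Mathlib
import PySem

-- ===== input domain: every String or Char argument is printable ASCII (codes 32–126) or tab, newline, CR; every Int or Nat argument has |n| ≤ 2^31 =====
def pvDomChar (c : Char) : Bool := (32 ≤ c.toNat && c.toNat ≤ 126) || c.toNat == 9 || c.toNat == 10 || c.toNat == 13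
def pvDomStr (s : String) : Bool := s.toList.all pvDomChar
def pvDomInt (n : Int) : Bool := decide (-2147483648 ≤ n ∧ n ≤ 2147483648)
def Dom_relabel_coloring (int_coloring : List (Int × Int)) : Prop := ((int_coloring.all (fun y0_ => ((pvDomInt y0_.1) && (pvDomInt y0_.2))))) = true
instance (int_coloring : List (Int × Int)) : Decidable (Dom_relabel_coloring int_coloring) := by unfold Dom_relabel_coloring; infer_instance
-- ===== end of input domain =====

-- B replaces A's per-color scans of the whole dict by a single counting/grouping pass plus one
-- stable sort of the color indices (same return value, dict insertion order included).

-- ===== PORT A =====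
def relabel_coloring (int_coloring : List (Int × Int)) : List (Int × Int) :=
  -- num_int = len(set(int_coloring.values()))
  let num_int : Int := (PySem.Set.ofList (int_coloring.map (·.2))).length
  -- for i in range(num_int): num = len([k for k,v in items if v == i]); arr.append((i,num))
  let arr : List (Int × Int) :=
    (PySem.List.pyRange 0 num_int 1).foldl (fun arr i =>
      let num : Int := ((int_coloring.filter (fun kv => kv.2 == i)).map (·.1)).length
      arr ++ [(i, num)]) []
  -- arr.sort(key=lambda x: x[1])
  let arr := PySem.List.sorted arr (fun x => x.2) false
  -- for i in range(num_int): old_color = arr[num_int-i-1][0]; temp = [...]; for k in temp: new[k] = i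
  let new_coloring : PySem.Dict Int Int :=
    (PySem.List.pyRange 0 num_int 1).foldl (fun new_coloring i =>
      let old_color := (PySem.List.pyGetD arr (num_int - i - 1) (0, 0)).1
      let temp := (int_coloring.filter (fun kv => kv.2 == old_color)).map (·.1)
      temp.foldl (fun new_coloring k => new_coloring.insert k i) new_coloring) PySem.Dict.empty
  new_coloring.items

-- ===== PORT B =====
def relabel_coloring_alt (int_coloring : List (Int × Int)) : List (Int × Int) :=
  -- one pass: cnt[v] = cnt.get(v,0)+1; groups.setdefault(v, []).append(k)
  let st : PySem.Dict Int Int × PySem.Dict Int (List Int) :=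
    int_coloring.foldl (fun st kv =>
      (st.1.insert kv.2 (st.1.getD kv.2 0 + 1), st.2.modify kv.2 [] (· ++ [kv.1])))
      (PySem.Dict.empty, PySem.Dict.empty)
  let cnt := st.1
  let groups := st.2
  let d : Int := cnt.size
  -- order = sorted(range(d-1, -1, -1), key=lambda c: -cnt.get(c, 0))
  let order := PySem.List.sorted (PySem.List.pyRange (d - 1) (-1) (-1)) (fun c => -(cnt.getD c 0)) false
  -- for i, c in enumerate(order): for k in groups.get(c, []): new[k] = i
  let new_coloring : PySem.Dict Int Int :=
    (PySem.List.enumerate order).foldl (fun new_coloring p =>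
      (groups.getD p.2 []).foldl (fun new_coloring k => new_coloring.insert k p.1) new_coloring)
      PySem.Dict.empty
  new_coloring.items

-- ===== PRECONDITION & SPEC =====
def Spec_relabel_coloring (int_coloring : List (Int × Int)) (out : List (Int × Int)) : Prop := out = relabel_coloring_alt int_coloring
instance (int_coloring : List (Int × Int)) (out : List (Int × Int)) : Decidable (Spec_relabel_coloring int_coloring out) := by unfold Spec_relabel_coloring; infer_instance

-- ===== CLAIM (what is proved, stated in full; the proofs are below) =====
def Claim_equal_relabel_coloring : Prop := ∀ (int_coloring : List (Int × Int)), Dom_relabel_coloring int_coloring → Spec_relabel_coloring int_coloring (relabel_coloring int_coloring)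

-- ===== LEMMAS AND PROOFS =====

-- Abbreviations for the proofs (not used by the ports or the claim).
def pvVals (ic : List (Int × Int)) : List Int := ic.map (·.2)
def pvF (ic : List (Int × Int)) (c : Int) : Int := ((pvVals ic).count c : Int)
def pvTemp (ic : List (Int × Int)) (c : Int) : List Int :=
  (ic.filter (fun kv => kv.2 == c)).map (·.1)
def pvD (ic : List (Int × Int)) : Nat := (PySem.Set.ofList (pvVals ic)).length
def pvArrS (ic : List (Int × Int)) : List (Int × Int) :=
  PySem.List.sorted ((PySem.List.pyRange 0 (pvD ic) 1).map (fun i => (i, pvF ic i))) (fun x => x.2) false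
def pvOrder (ic : List (Int × Int)) : List Int := ((pvArrS ic).map (·.1)).reverse

-- STABILITY of PySem's insertion sort, in the form needed here: if the input is
-- pairwise `q`, the output is pairwise "strictly smaller key, or equal key and `q`".
theorem pv_insertBy_pairwise {α κ : Type} [LinearOrder κ] (key : α → κ) (q : α → α → Prop)
    (x : α) (ys : List α)
    (hys : ys.Pairwise (fun a b => key a < key b ∨ (key a = key b ∧ q a b)))
    (hx : ∀ a ∈ ys, key a = key x → q a x) :
    (PySem.List.insertBy (fun a b => decide (key a < key b)) x ys).Pairwise
      (fun a b => key a < key b ∨ (key a = key b ∧ q a b)) := by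
  induction ys with
  | nil => simp [PySem.List.insertBy]
  | cons y ys ih =>
    rw [List.pairwise_cons] at hys
    obtain ⟨hy, hys'⟩ := hys
    by_cases h : key x < key y
    · simp only [PySem.List.insertBy, h, decide_true, if_true]
      refine List.pairwise_cons.mpr ⟨?_, List.pairwise_cons.mpr ⟨hy, hys'⟩⟩
      intro z hz
      rcases List.mem_cons.mp hz with rfl | hz'
      · exact Or.inl h
      · rcases hy z hz' with h' | ⟨h', _⟩
        · exact Or.inl (lt_trans h h')
        · exact Or.inl (h' ▸ h)
    · simp only [PySem.List.insertBy, h, decide_false]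
      refine List.pairwise_cons.mpr
        ⟨?_, ih hys' (fun a ha he => hx a (List.mem_cons_of_mem _ ha) he)⟩
      intro z hz
      rcases (PySem.List.mem_insertBy _ _ _ _).mp hz with rfl | hz'
      · rcases lt_or_eq_of_le (not_lt.mp h) with hlt | heq
        · exact Or.inl hlt
        · exact Or.inr ⟨heq, hx y (List.mem_cons_self ..) heq⟩
      · exact hy z hz'

theorem pv_foldl_insertBy_pairwise {α κ : Type} [LinearOrder κ] (key : α → κ) (q : α → α → Prop) :
    ∀ (xs acc : List α),
      acc.Pairwise (fun a b => key a < key b ∨ (key a = key b ∧ q a b)) →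
      (∀ a ∈ acc, ∀ x ∈ xs, key a = key x → q a x) →
      xs.Pairwise q →
      (xs.foldl (fun acc x => PySem.List.insertBy (fun a b => decide (key a < key b)) x acc)
        acc).Pairwise (fun a b => key a < key b ∨ (key a = key b ∧ q a b)) := by
  intro xs
  induction xs with
  | nil => intro acc h _ _; simpa using h
  | cons x xs ih =>
    intro acc hacc hmix hq
    rw [List.pairwise_cons] at hq
    obtain ⟨hqx, hq'⟩ := hq
    refine ih _ (pv_insertBy_pairwise key q x acc hacc
      (fun a ha he => hmix a ha x (List.mem_cons_self ..) he)) ?_ hq'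
    intro a ha z hz he
    rcases (PySem.List.mem_insertBy _ _ _ _).mp ha with rfl | ha'
    · exact hqx z hz
    · exact hmix a ha' z (List.mem_cons_of_mem _ hz) he

theorem pv_sorted_stable_pairwise {α κ : Type} [LinearOrder κ] (xs : List α) (key : α → κ)
    (q : α → α → Prop) (h : xs.Pairwise q) :
    (PySem.List.sorted xs key false).Pairwise
      (fun a b => key a < key b ∨ (key a = key b ∧ q a b)) := by
  rw [PySem.List.sorted_eq_foldl_insertBy]
  exact pv_foldl_insertBy_pairwise key q xs [] (by simp) (by simp) h

-- len([k for k,v in items if v == c]) is the multiplicity of c among the values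
theorem pv_num (ic : List (Int × Int)) (c : Int) :
    (((ic.filter (fun kv => kv.2 == c)).map (·.1)).length : Int) = pvF ic c := by
  have h : (pvVals ic).count c = (ic.filter (fun kv => kv.2 == c)).length := by
    rw [List.count_eq_countP, pvVals, List.countP_map, List.countP_eq_length_filter]; rfl
  simp [pvF, h, List.length_map]

-- A in canonical form
theorem pv_A_eq (ic : List (Int × Int)) :
    relabel_coloring ic =
      ((PySem.List.pyRange 0 ((pvD ic : Int)) 1).foldl (fun nd i =>
        (pvTemp ic ((PySem.List.pyGetD (pvArrS ic) ((pvD ic : Int) - i - 1) (0, 0)).1)).foldl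
          (fun nd k => nd.insert k i) nd) PySem.Dict.empty).items := by
  simp only [relabel_coloring, PySem.List.foldl_append_singleton_eq_map, List.nil_append,
    pv_num, pvTemp, pvArrS, pvD, pvVals]

-- the counting loop is Counter(values)
theorem pv_cnt (ic : List (Int × Int)) :
    ic.foldl (fun d kv => d.insert kv.2 (d.getD kv.2 0 + 1)) PySem.Dict.empty
      = PySem.Dict.counter (pvVals ic) := by
  rw [pvVals, ← PySem.Dict.foldl_insert_getD_add_one_eq_counter, List.foldl_map]

-- the grouping loop, looked up at any color, is the filtered key list
theorem pv_groups (ic : List (Int × Int)) (c : Int) :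
    (ic.foldl (fun d kv => d.modify kv.2 [] (· ++ [kv.1])) PySem.Dict.empty).getD c []
      = pvTemp ic c := by
  have h := PySem.Dict.getD_foldl_modify_append (ic.map (fun kv => (kv.2, kv.1)))
    PySem.Dict.empty c
  rw [List.foldl_map] at h
  simpa [pvTemp, List.filter_map, Function.comp, PySem.Dict.getD_empty] using h

theorem pv_size (ic : List (Int × Int)) :
    (PySem.Dict.counter (pvVals ic)).size = pvD ic := by
  have h := congrArg List.length (PySem.Dict.keys_counter (pvVals ic))
  simpa [PySem.Dict.keys, PySem.Dict.size, pvD] using h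

theorem pv_len_arrS (ic : List (Int × Int)) : (pvArrS ic).length = pvD ic := by
  simp [pvArrS, PySem.List.length_sorted, PySem.List.length_pyRange_one]

theorem pv_len_order (ic : List (Int × Int)) : (pvOrder ic).length = pvD ic := by
  simp [pvOrder, pv_len_arrS]

-- every entry of the sorted popularity array is (c, multiplicity of c)
theorem pv_mem_arrS (ic : List (Int × Int)) (p : Int × Int) (hp : p ∈ pvArrS ic) :
    p.2 = pvF ic p.1 := by
  rw [pvArrS, PySem.List.mem_sorted] at hp
  obtain ⟨i, _, rfl⟩ := List.mem_map.mp hp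
  rfl

-- B's sort of the descending color range is A's sorted array read backwards
theorem pv_order_eq (ic : List (Int × Int)) :
    PySem.List.sorted (PySem.List.pyRange ((pvD ic : Int) - 1) (-1) (-1))
      (fun c => -(pvF ic c)) false = pvOrder ic := by
  have hrange : PySem.List.pyRange ((pvD ic : Int) - 1) (-1) (-1)
      = (PySem.List.pyRange 0 (pvD ic) 1).reverse := by
    rw [PySem.List.pyRange_neg_one_eq_reverse]
    norm_num
  refine List.Perm.eq_of_pairwise
    (le := fun a b => pvF ic b < pvF ic a ∨ (pvF ic a = pvF ic b ∧ b < a))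
    (fun a b _ _ h1 h2 => by rcases h1 with h1 | ⟨h1, h1'⟩ <;> rcases h2 with h2 | ⟨h2, h2'⟩ <;> omega)
    ?_ ?_ ?_
  · -- sorted side
    have hq : (PySem.List.pyRange ((pvD ic : Int) - 1) (-1) (-1)).Pairwise (fun a b => b < a) := by
      rw [hrange, List.pairwise_reverse]
      exact PySem.List.pairwise_lt_pyRange_one 0 (pvD ic)
    have := pv_sorted_stable_pairwise (PySem.List.pyRange ((pvD ic : Int) - 1) (-1) (-1))
      (fun c => -(pvF ic c)) (fun a b => b < a) hq
    refine this.imp ?_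
    intro a b h
    have h' : -pvF ic a < -pvF ic b ∨ (-pvF ic a = -pvF ic b ∧ b < a) := h
    rcases h' with h' | ⟨h', h''⟩ <;> [exact Or.inl (by omega); exact Or.inr ⟨by omega, h''⟩]
  · -- pvOrder side
    rw [pvOrder, List.pairwise_reverse, List.pairwise_map]
    have harr : ((PySem.List.pyRange 0 (pvD ic) 1).map (fun i => (i, pvF ic i))).Pairwise
        (fun a b => a.1 < b.1) := by
      rw [List.pairwise_map]
      exact PySem.List.pairwise_lt_pyRange_one 0 (pvD ic)
    have hS := pv_sorted_stable_pairwise _ (fun x : Int × Int => x.2)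
      (fun a b => a.1 < b.1) harr
    refine List.Pairwise.imp_of_mem ?_ hS
    intro a b ha hb h
    have ha2 := pv_mem_arrS ic a ha
    have hb2 := pv_mem_arrS ic b hb
    have h' : a.2 < b.2 ∨ (a.2 = b.2 ∧ a.1 < b.1) := h
    rcases h' with h' | ⟨h', h''⟩
    · exact Or.inl (by omega)
    · exact Or.inr ⟨by omega, h''⟩
  · -- permutation
    have h2 : ((pvArrS ic).map (·.1)).Perm (PySem.List.pyRange 0 (pvD ic) 1) := by
      have h3 := ((PySem.List.sorted_perm ((PySem.List.pyRange 0 (pvD ic) 1).map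
        (fun i => (i, pvF ic i))) (fun x : Int × Int => x.2) false).map (·.1))
      simpa [pvArrS, List.map_map, Function.comp_def] using h3
    refine (PySem.List.sorted_perm _ _ _).trans ?_
    rw [hrange]
    refine (List.reverse_perm _).trans ?_
    have : pvOrder ic = ((pvArrS ic).map (·.1)).reverse := rfl
    rw [this]
    exact h2.symm.trans (List.reverse_perm _).symm

-- B in canonical form
theorem pv_B_eq (ic : List (Int × Int)) :
    relabel_coloring_alt ic =
      ((PySem.List.pyRange 0 ((pvD ic : Int)) 1).foldl (fun nd j =>
        (pvTemp ic (PySem.List.pyGetD (pvOrder ic) j 0)).foldl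
          (fun nd k => nd.insert k j) nd) PySem.Dict.empty).items := by
  have hst : ic.foldl (fun st kv =>
        (st.1.insert kv.2 (st.1.getD kv.2 0 + 1), st.2.modify kv.2 [] (· ++ [kv.1])))
        ((PySem.Dict.empty : PySem.Dict Int Int), (PySem.Dict.empty : PySem.Dict Int (List Int)))
      = (PySem.Dict.counter (pvVals ic),
         ic.foldl (fun d kv => d.modify kv.2 [] (· ++ [kv.1])) PySem.Dict.empty) := by
    rw [PySem.List.foldl_prod_mk
      (f := fun (d : PySem.Dict Int Int) (kv : Int × Int) => d.insert kv.2 (d.getD kv.2 0 + 1))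
      (g := fun (d : PySem.Dict Int (List Int)) (kv : Int × Int) => d.modify kv.2 [] (· ++ [kv.1])),
      pv_cnt]
  have hpvF : ∀ c : Int, ((List.count c (pvVals ic) : Nat) : Int) = pvF ic c := fun _ => rfl
  simp only [relabel_coloring_alt, hst]
  simp only [PySem.Dict.getD_counter, hpvF, pv_size]
  rw [pv_order_eq ic]
  have hlen : PySem.List.len (pvOrder ic) = ((pvD ic : Int)) := by
    simp [PySem.List.len, pv_len_order]
  rw [PySem.List.enumerate_eq_map_pyRange (pvOrder ic) 0, hlen, List.foldl_map]
  dsimp only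
  simp only [pv_groups]

theorem pv_idx (ic : List (Int × Int)) (j : Int) (h0 : 0 ≤ j) (h1 : j < (pvD ic : Int)) :
    PySem.List.pyGetD (pvOrder ic) j 0
      = (PySem.List.pyGetD (pvArrS ic) ((pvD ic : Int) - j - 1) (0, 0)).1 := by
  have hS := pv_len_arrS ic
  have hO := pv_len_order ic
  rw [PySem.List.pyGetD_eq_getElem _ _ h0 (by rw [hO]; exact_mod_cast h1),
      PySem.List.pyGetD_eq_getElem _ _ (by omega) (by rw [hS]; omega)]
  have hidx : ((pvD ic : Int) - j - 1).toNat = pvD ic - 1 - j.toNat := by omega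
  simp only [pvOrder, List.getElem_reverse, List.getElem_map, List.length_map, hS, hidx]

-- ===== VERDICT (by name: the statement is the Claim_ definition above) =====
theorem relabel_coloring_spec : Claim_equal_relabel_coloring := by
  intro ic _
  unfold Spec_relabel_coloring
  rw [pv_A_eq, pv_B_eq]
  refine congrArg PySem.Dict.items (PySem.List.foldl_congr_mem _ _ _ _ ?_)
  intro acc j hj
  rw [PySem.List.mem_pyRange_one] at hj
  rw [pv_idx ic j hj.1 hj.2]
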